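-- pv_equiv track=rewrite | github.com/toddstoffel/MongoSQL | src/modules/cte/cte_preprocessor.py | _find_main_select_position
-- ===== SOURCE A (Python) =====
-- def _find_main_select_position(sql: str, with_pos: int) -> int:
--     """Find the position of the main SELECT after WITH clause"""
--     paren_depth = 0
--     i = with_pos + 4  # Start after 'WITH'
--
--     while i < len(sql):
--         char = sql[i]
--
--         if char == "(":
--             paren_depth += 1
--         elif char == ")":
--             paren_depth -= 1
--         elif paren_depth == 0:
--             # Check for SELECT keyword outside parentheses
--             if (
--                 sql[i : i + 6].upper() == "SELECT"
--                 and (i == 0 or not sql[i - 1].isalnum())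
--                 and (i + 6 >= len(sql) or not sql[i + 6].isalnum())
--             ):
--                 return i
--
--         i += 1
--
--     return -1
-- ===== SOURCE B (Python) =====
-- def _boundary_ok(sql: str, p: int) -> bool:
--     return (p == 0 or not sql[p - 1].isalnum()) and (
--         p + 6 >= len(sql) or not sql[p + 6].isalnum()
--     )
--
--
-- def _find_main_select_position(sql: str, with_pos: int) -> int:
--     """Find the position of the main SELECT after WITH clause"""
--     start = with_pos + 4  # Start after 'WITH'
--     n = len(sql)
--     # Enumerate every SELECT-shaped candidate position first, then walk the
--     # parenthesis depth only between consecutive candidates.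
--     candidates = [j for j in range(n) if j >= start and sql[j : j + 6].upper() == "SELECT"]
--     depth = 0
--     cursor = start
--     for p in candidates:
--         for ch in sql[cursor:p]:
--             if ch == "(":
--                 depth += 1
--             elif ch == ")":
--                 depth -= 1
--         cursor = p
--         if depth == 0 and _boundary_ok(sql, p):
--             return p
--     return -1
-- ===== Notes on version B (the rewrite author's own statement) =====
-- stated objective: alternative
-- what changed: Replaces A's single stateful per-character scan by a two-phase decomposition: first enumerate all SELECT-shaped candidate positions at or after the start, then walk the parenthesis depth only between consecutive candidates and return the first candidate at depth 0.
-- outside the precondition, e.g. on _find_main_select_position(' select xxx', -14): A returns -10, B returns 1; on _find_main_select_position('abcselect', -100): A raises IndexError, B returns -1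
import Mathlib
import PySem

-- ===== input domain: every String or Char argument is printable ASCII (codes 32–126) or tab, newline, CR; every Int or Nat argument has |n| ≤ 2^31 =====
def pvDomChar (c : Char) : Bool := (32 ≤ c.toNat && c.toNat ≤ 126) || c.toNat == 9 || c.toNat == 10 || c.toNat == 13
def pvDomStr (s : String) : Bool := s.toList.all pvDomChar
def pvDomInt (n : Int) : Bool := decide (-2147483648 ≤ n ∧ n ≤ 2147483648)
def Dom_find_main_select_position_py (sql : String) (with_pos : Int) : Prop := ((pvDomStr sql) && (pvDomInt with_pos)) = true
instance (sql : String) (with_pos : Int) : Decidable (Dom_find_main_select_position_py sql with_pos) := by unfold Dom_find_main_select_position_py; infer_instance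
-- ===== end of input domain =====

-- B replaces A's single stateful per-character scan by candidate enumeration plus
-- gap-wise parenthesis counting (objective: alternative decomposition, same cost).

-- ===== PORT A =====
-- shared boundary expression: 'sql[j].isalnum()' (both Python sources contain it verbatim)
def pvIsAln (cs : List Char) (j : Int) : Bool :=
  match PySem.List.pyGet? cs j with
  | some c => PySem.Chars.isalnum c
  | none => false  -- unreachable on admitted inputs (index always in range when read)

-- shared expression 'sql[i:i+6].upper() == "SELECT"' (verbatim in both Python sources)
def pvMatch6 (cs : List Char) (i : Int) : Bool :=
  PySem.Chars.upper (PySem.List.slice cs (some i) (some (i + 6))) == "SELECT".toList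

-- shared boundary test '(i == 0 or not sql[i-1].isalnum()) and (i+6 >= len(sql) or not sql[i+6].isalnum())'
def pvBnd (cs : List Char) (i : Int) : Bool :=
  ((i == 0) || !(pvIsAln cs (i - 1))) &&
    ((decide ((cs.length : Int) ≤ i + 6)) || !(pvIsAln cs (i + 6)))

-- A's while loop; fuel = number of remaining iterations (termination bookkeeping only)
def pvAGo (cs : List Char) (i : Int) (depth : Int) : Nat → Int
  | 0 => -1  -- never reached: fuel is exactly the remaining iteration count
  | fuel + 1 =>
    if i < (cs.length : Int) then
      match PySem.List.pyGet? cs i with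
      | none => -1  -- Python raises IndexError here; excluded by Pre_
      | some ch =>
        if ch = '(' then pvAGo cs (i + 1) (depth + 1) fuel
        else if ch = ')' then pvAGo cs (i + 1) (depth - 1) fuel
        else if depth = 0 then
          if pvMatch6 cs i && pvBnd cs i then i
          else pvAGo cs (i + 1) depth fuel
        else pvAGo cs (i + 1) depth fuel
    else -1

def find_main_select_position_py (sql : String) (with_pos : Int) : Int :=
  pvAGo sql.toList (with_pos + 4) 0 (((sql.toList.length : Int) - (with_pos + 4)).toNat)

-- ===== PORT B =====
-- '[j for j in range(n) if j >= start and sql[j:j+6].upper() == "SELECT"]'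
def pvCands (cs : List Char) (start : Int) : List Nat :=
  (List.range cs.length).filter (fun j => decide (start ≤ (j : Int)) && pvMatch6 cs (j : Int))

-- the 'for p in candidates' loop: count parens over sql[cursor:p], then test depth/boundary
def pvBGo (cs : List Char) (cands : List Nat) (cursor : Int) (depth : Int) : Int :=
  match cands with
  | [] => -1
  | p :: rest =>
    let d := (PySem.List.slice cs (some cursor) (some ((p : Nat) : Int))).foldl
      (fun acc ch => if ch = '(' then acc + 1 else if ch = ')' then acc - 1 else acc) depth
    if d == 0 && pvBnd cs (p : Int) then (p : Int) else pvBGo cs rest (p : Int) d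

def find_main_select_position_py_alt (sql : String) (with_pos : Int) : Int :=
  pvBGo sql.toList (pvCands sql.toList (with_pos + 4)) (with_pos + 4) 0

-- ===== PRECONDITION & SPEC =====
-- Pre_ restricts to the natural domain with_pos + 4 ≥ 0 (with_pos is the index of 'WITH'
-- inside sql): for with_pos < -4 A either raises IndexError (when with_pos + 4 < -len(sql)
-- and sql is nonempty) or scans via Python's accidental negative-index wraparound and can
-- even return a negative "position".
def Pre_find_main_select_position_py (sql : String) (with_pos : Int) : Prop :=
  0 ≤ with_pos + 4
instance (sql : String) (with_pos : Int) : Decidable (Pre_find_main_select_position_py sql with_pos) := by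
  unfold Pre_find_main_select_position_py; infer_instance

def pvWitness_find_main_select_position_py : String × Int :=
  ("WITH x AS (SELECT 1) SELECT 2", 0)

def Spec_find_main_select_position_py (sql : String) (with_pos : Int) (out : Int) : Prop :=
  out = find_main_select_position_py_alt sql with_pos
instance (sql : String) (with_pos : Int) (out : Int) : Decidable (Spec_find_main_select_position_py sql with_pos out) := by
  unfold Spec_find_main_select_position_py; infer_instance

-- ===== CLAIM (what is proved, stated in full; the proofs are below) =====
def Claim_equal_find_main_select_position_py : Prop := ∀ (sql : String) (with_pos : Int), Dom_find_main_select_position_py sql with_pos → Pre_find_main_select_position_py sql with_pos → Spec_find_main_select_position_py sql with_pos (find_main_select_position_py sql with_pos)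

-- ===== LEMMAS AND PROOFS =====

-- proof-side normal form of the candidate list: candidates at positions ≥ a
def pvCandsR (cs : List Char) (a : Nat) : List Nat :=
  (List.range' a (cs.length - a)).filter (fun p => pvMatch6 cs (p : Int))

theorem pv_range_filter_le (n a : Nat) :
    (List.range n).filter (fun p => decide (a ≤ p)) = List.range' a (n - a) := by
  induction n with
  | zero => simp
  | succ n ih =>
    rw [List.range_succ, List.filter_append, ih]
    by_cases h : a ≤ n
    · have h2 : n + 1 - a = (n - a) + 1 := by omega
      simp [h, h2, List.range'_concat, Nat.add_sub_cancel' h]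
    · have h2 : n + 1 - a = 0 := by omega
      have h3 : n - a = 0 := by omega
      simp [h, h2, h3]

theorem pvCands_eq (cs : List Char) (a : Nat) : pvCands cs (a : Int) = pvCandsR cs a := by
  unfold pvCands pvCandsR
  rw [← pv_range_filter_le cs.length a, List.filter_filter]
  apply List.filter_congr
  intro p _
  simp [Nat.cast_le, Bool.and_comm]

theorem pvCandsR_mem (cs : List Char) (a p : Nat) (h : p ∈ pvCandsR cs a) :
    a ≤ p ∧ p < cs.length := by
  unfold pvCandsR at h
  have := List.mem_filter.mp h
  have hm := List.mem_range'_1.mp this.1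
  omega

theorem pvCandsR_nil (cs : List Char) (a : Nat) (h : cs.length ≤ a) : pvCandsR cs a = [] := by
  unfold pvCandsR
  rw [Nat.sub_eq_zero_of_le h]
  rfl

theorem pvCandsR_step (cs : List Char) (j : Nat) (hj : j < cs.length) :
    pvCandsR cs j =
      if pvMatch6 cs (j : Int) then j :: pvCandsR cs (j + 1) else pvCandsR cs (j + 1) := by
  unfold pvCandsR
  have h1 : cs.length - j = (cs.length - (j + 1)) + 1 := by omega
  rw [h1, List.range'_succ, List.filter_cons]

theorem pv_slice_cons (cs : List Char) (j p : Nat) (hjp : j < p) (hj : j < cs.length) :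
    PySem.List.slice cs (some (j : Int)) (some (p : Int)) =
      cs[j] :: PySem.List.slice cs (some ((j : Int) + 1)) (some (p : Int)) := by
  have h1 : ((j : Int) + 1) = ((j + 1 : Nat) : Int) := by push_cast; ring
  rw [h1, PySem.List.slice_natCast, PySem.List.slice_natCast]
  rw [List.drop_eq_getElem_cons hj]
  have h2 : p - j = (p - (j + 1)) + 1 := by omega
  rw [h2, List.take_succ_cons]

theorem pv_slice_self (cs : List Char) (p : Nat) :
    PySem.List.slice cs (some (p : Int)) (some (p : Int)) = [] := by
  rw [PySem.List.slice_natCast]; simp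

theorem pvMatch6_head (cs : List Char) (j : Nat) (hj : j < cs.length)
    (h : pvMatch6 cs (j : Int) = true) : PySem.Chars.upperChar cs[j] = 'S' := by
  unfold pvMatch6 at h
  rw [beq_iff_eq] at h
  have h6 : (j : Int) + 6 = ((j + 6 : Nat) : Int) := by push_cast; ring
  rw [h6, PySem.List.slice_natCast, List.drop_eq_getElem_cons hj] at h
  have h7 : j + 6 - j = 6 := by omega
  rw [h7, List.take_succ_cons] at h
  simp only [PySem.Chars.upper, List.map_cons] at h
  have := List.head_eq_of_cons_eq h
  simpa using this

-- shifting the cursor of pvBGo one character to the right past a non-candidate position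
theorem pvBGo_shift (cs : List Char) (L : List Nat) (j : Nat) (d : Int)
    (hj : j < cs.length) (hL : ∀ p ∈ L, j + 1 ≤ p ∧ p < cs.length) :
    pvBGo cs L (j : Int) d =
      pvBGo cs L ((j : Int) + 1)
        (if cs[j] = '(' then d + 1 else if cs[j] = ')' then d - 1 else d) := by
  cases L with
  | nil => rfl
  | cons p rest =>
    have hp := hL p (by simp)
    simp only [pvBGo]
    rw [pv_slice_cons cs j p (by omega) hj, List.foldl_cons]

theorem pvMain (cs : List Char) :
    ∀ (k j : Nat) (d : Int), cs.length - j = k →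
      pvAGo cs (j : Int) d k = pvBGo cs (pvCandsR cs j) (j : Int) d := by
  intro k
  induction k with
  | zero =>
    intro j d hk
    rw [pvCandsR_nil cs j (by omega)]
    rfl
  | succ k ih =>
    intro j d hk
    have hj : j < cs.length := by omega
    have hk1 : cs.length - (j + 1) = k := by omega
    have hcast : (j : Int) + 1 = ((j + 1 : Nat) : Int) := by push_cast; ring
    have hlt : (j : Int) < (cs.length : Int) := by exact_mod_cast hj
    have hget : PySem.List.pyGet? cs (j : Int) = some cs[j] := by
      rw [PySem.List.pyGet?_natCast]
      simp [List.getElem?_eq_getElem hj]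
    have hmem : ∀ p ∈ pvCandsR cs (j + 1), j + 1 ≤ p ∧ p < cs.length :=
      fun p hp => pvCandsR_mem cs (j + 1) p hp
    simp only [pvAGo, hget, if_pos hlt]
    by_cases h1 : cs[j] = '('
    · rw [if_pos h1]
      rw [pvCandsR_step cs j hj]
      have hm : pvMatch6 cs (j : Int) = false := by
        cases hmb : pvMatch6 cs (j : Int)
        · rfl
        · exfalso
          have := pvMatch6_head cs j hj hmb
          rw [h1] at this
          exact absurd this (by decide)
      rw [hm, if_neg (by simp)]
      rw [pvBGo_shift cs _ j d hj hmem, if_pos h1, hcast]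
      exact ih (j + 1) (d + 1) hk1
    · rw [if_neg h1]
      by_cases h2 : cs[j] = ')'
      · rw [if_pos h2]
        rw [pvCandsR_step cs j hj]
        have hm : pvMatch6 cs (j : Int) = false := by
          cases hmb : pvMatch6 cs (j : Int)
          · rfl
          · exfalso
            have := pvMatch6_head cs j hj hmb
            rw [h2] at this
            exact absurd this (by decide)
        rw [hm, if_neg (by simp)]
        rw [pvBGo_shift cs _ j d hj hmem, if_neg h1, if_pos h2, hcast]
        exact ih (j + 1) (d - 1) hk1
      · rw [if_neg h2]
        rw [pvCandsR_step cs j hj]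
        cases hmb : pvMatch6 cs (j : Int)
        · -- not a candidate
          simp only [Bool.false_and, Bool.false_eq_true, if_false, ite_self]
          rw [pvBGo_shift cs _ j d hj hmem, if_neg h1, if_neg h2, hcast]
          exact ih (j + 1) d hk1
        · -- candidate
          rw [if_pos rfl]
          simp only [pvBGo, pv_slice_self cs j, List.foldl_nil]
          by_cases hd : d = 0
          · by_cases hb : pvBnd cs (j : Int) = true
            · simp [hd, hb]
            · have hb' : pvBnd cs (j : Int) = false := by simpa using hb
              simp only [hb', Bool.and_false, Bool.false_eq_true, if_false, ite_self]
              rw [pvBGo_shift cs _ j d hj hmem, if_neg h1, if_neg h2, hcast]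
              exact ih (j + 1) d hk1
          · have hd' : (d == 0) = false := by simp [hd]
            rw [if_neg hd]
            simp only [hd', Bool.false_and, Bool.false_eq_true, if_false]
            rw [pvBGo_shift cs _ j d hj hmem, if_neg h1, if_neg h2, hcast]
            exact ih (j + 1) d hk1

-- ===== VERDICT (by name: the statement is the Claim_ definition above) =====
theorem find_main_select_position_py_spec : Claim_equal_find_main_select_position_py := by
  intro sql with_pos _hDom hPre
  unfold Spec_find_main_select_position_py
  unfold find_main_select_position_py find_main_select_position_py_alt
  have hPre' : 0 ≤ with_pos + 4 := hPre
  have hs : with_pos + 4 = (((with_pos + 4).toNat : Nat) : Int) :=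
    (Int.toNat_of_nonneg hPre').symm
  rw [hs, pvCands_eq]
  have hf : (((sql.toList.length : Int) - (((with_pos + 4).toNat : Nat) : Int)).toNat)
      = sql.toList.length - (with_pos + 4).toNat := by omega
  rw [hf]
  exact pvMain sql.toList _ _ 0 rfl
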